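-- pv_equiv track=rewrite | github.com/manwar/perlweeklychallenge-club | challenge-365/lubos-kolouch/python/ch-1.py | alphabet_index_digit_sum
-- ===== SOURCE A (Python) =====
-- def alphabet_index_digit_sum(text: str, k: int) -> int:
--     """
--     Convert string to numbers, sum digits K times.
--
--     Args:
--         text: String of lowercase English letters.
--         k: Number of times to sum digits.
--
--     Returns:
--         The final digit sum after K iterations.
--
--     Raises:
--         ValueError: If text is empty or k is not positive.
--     """
--     if not text:
--         raise ValueError("text must not be empty")
--     if k < 1:
--         raise ValueError("k must be a positive integer")
--
--     numbers: str = ""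
--     for char in text:
--         if not ("a" <= char <= "z"):
--             raise ValueError(f"Invalid character: {char}")
--         num = ord(char) - ord("a") + 1
--         numbers += str(num)
--
--     digit_sum = sum(int(d) for d in numbers)
--
--     for _ in range(2, k + 1):
--         digit_sum = sum(int(d) for d in str(digit_sum))
--
--     return digit_sum
-- ===== SOURCE B (Python) =====
-- def alphabet_index_digit_sum(text: str, k: int) -> int:
--     """Same result as A, but without building the intermediate digit string:
--     one arithmetic pass accumulates each letter's digit sum directly, and the
--     repeated digit-sum rounds are done with integer arithmetic."""
--     if not text:
--         raise ValueError("text must not be empty")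
--     if k < 1:
--         raise ValueError("k must be a positive integer")
--
--     total = 0
--     for char in text:
--         if not ("a" <= char <= "z"):
--             raise ValueError(f"Invalid character: {char}")
--         v = ord(char) - ord("a") + 1
--         total += v if v < 10 else v // 10 + v % 10
--
--     for _ in range(k - 1):
--         s = 0
--         while total > 0:
--             s += total % 10
--             total //= 10
--         total = s
--
--     return total
-- ===== Notes on version B (the rewrite author's own statement) =====
-- stated objective: faster
-- what changed: B removes the intermediate digit string entirely: one arithmetic pass accumulates each letter's digit sum (v or v//10+v%10) directly, and the k-1 repeated digit-sum rounds use integer %-and-// arithmetic instead of str()/int() round-trips.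
import Mathlib
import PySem

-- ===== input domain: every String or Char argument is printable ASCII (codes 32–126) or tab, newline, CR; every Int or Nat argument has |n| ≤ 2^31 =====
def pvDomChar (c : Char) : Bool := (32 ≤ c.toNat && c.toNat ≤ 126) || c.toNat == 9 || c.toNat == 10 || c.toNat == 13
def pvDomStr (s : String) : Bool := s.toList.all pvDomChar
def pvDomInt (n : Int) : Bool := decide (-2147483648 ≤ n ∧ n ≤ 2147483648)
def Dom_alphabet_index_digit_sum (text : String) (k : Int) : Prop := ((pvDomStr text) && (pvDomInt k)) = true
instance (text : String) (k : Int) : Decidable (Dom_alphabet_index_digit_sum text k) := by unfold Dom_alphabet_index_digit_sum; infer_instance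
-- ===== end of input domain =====

-- B drops A's intermediate digit string: one arithmetic pass sums each letter's digit sum
-- directly, and the k-1 repeated digit-sum rounds are done with integer arithmetic (no str()).

-- ===== PORT A =====
-- int(d) for a single char; under Pre_ every char fed here is a decimal digit
def pvIntOfChar (d : Char) : Int := (PySem.Int.ofChars? [d]).getD 0

-- sum(int(d) for d in cs)
def pvSumds (cs : List Char) : Int := (cs.map pvIntOfChar).sum

-- the 'for char in text' loop building `numbers`; none = the ValueError on an invalid char
def pvBuild? : List Char → List Char → Option (List Char)
  | acc, [] => some acc
  | acc, c :: cs =>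
    if 'a' ≤ c ∧ c ≤ 'z' then
      pvBuild? (acc ++ PySem.Int.toChars ((c.toNat : Int) - 97 + 1)) cs
    else none

def alphabet_index_digit_sum (text : String) (k : Int) : Int :=
  if text.toList = [] then 0          -- A raises ValueError: outside Pre_
  else if k < 1 then 0                -- A raises ValueError: outside Pre_
  else
    match pvBuild? [] text.toList with
    | none => 0                       -- A raises ValueError: outside Pre_
    | some numbers =>
      (PySem.List.pyRange 2 (k + 1) 1).foldl
        (fun ds _ => pvSumds (PySem.Int.toChars ds)) (pvSumds numbers)

-- ===== PORT B =====
-- the validating arithmetic pass of Source B; none = the ValueError on an invalid char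
def pvScan? : List Char → Int → Option Int
  | [], s => some s
  | c :: cs, s =>
    if 'a' ≤ c ∧ c ≤ 'z' then
      pvScan? cs (s +
        (let v := (c.toNat : Int) - 97 + 1
         if v < 10 then v else PySem.Int.floordiv v 10 + PySem.Int.mod v 10))
    else none

-- Source B's 'while total > 0' digit-sum loop
def pvDsLoop (t s : Int) : Int :=
  if 0 < t then pvDsLoop (PySem.Int.floordiv t 10) (s + PySem.Int.mod t 10) else s
  termination_by t.toNat
  decreasing_by
    rw [PySem.Int.floordiv_eq_ediv_of_pos (by omega)]
    omega

def alphabet_index_digit_sum_alt (text : String) (k : Int) : Int :=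
  if text.toList = [] then 0          -- B raises ValueError: outside Pre_
  else if k < 1 then 0                -- B raises ValueError: outside Pre_
  else
    match pvScan? text.toList 0 with
    | none => 0                       -- B raises ValueError: outside Pre_
    | some total =>
      (PySem.List.pyRange 0 (k - 1) 1).foldl (fun t _ => pvDsLoop t 0) total

-- ===== PRECONDITION & SPEC =====
-- Pre_ excludes exactly the inputs on which A raises ValueError:
-- empty text, k < 1, or a character outside 'a'..'z'.
def Pre_alphabet_index_digit_sum (text : String) (k : Int) : Prop :=
  text.toList ≠ [] ∧ 1 ≤ k ∧ text.toList.all (fun c => decide ('a' ≤ c ∧ c ≤ 'z')) = true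
instance (text : String) (k : Int) : Decidable (Pre_alphabet_index_digit_sum text k) := by
  unfold Pre_alphabet_index_digit_sum; infer_instance

def pvWitness_alphabet_index_digit_sum : String × Int := ("ab", 1)

def Spec_alphabet_index_digit_sum (text : String) (k : Int) (out : Int) : Prop := out = alphabet_index_digit_sum_alt text k
instance (text : String) (k : Int) (out : Int) : Decidable (Spec_alphabet_index_digit_sum text k out) := by unfold Spec_alphabet_index_digit_sum; infer_instance

-- ===== CLAIM (what is proved, stated in full; the proofs are below) =====
def Claim_equal_alphabet_index_digit_sum : Prop := ∀ (text : String) (k : Int), Dom_alphabet_index_digit_sum text k → Pre_alphabet_index_digit_sum text k → Spec_alphabet_index_digit_sum text k (alphabet_index_digit_sum text k)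

-- ===== LEMMAS AND PROOFS =====

-- B's per-letter digit-sum expression, named for the proofs only
def pvBStep (c : Char) : Int :=
  if (c.toNat : Int) - 97 + 1 < 10 then (c.toNat : Int) - 97 + 1
  else PySem.Int.floordiv ((c.toNat : Int) - 97 + 1) 10 + PySem.Int.mod ((c.toNat : Int) - 97 + 1) 10

lemma pvIntOfChar_digitChar (m : Nat) (h : m < 10) :
    pvIntOfChar (Nat.digitChar m) = (m : Int) := by
  interval_cases m <;> decide

lemma pvSumds_cons (c : Char) (cs : List Char) :
    pvSumds (c :: cs) = pvIntOfChar c + pvSumds cs := by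
  simp [pvSumds]

lemma pvDsLoop_natCast (n : Nat) (s : Int) (hn : 0 < n) :
    pvDsLoop (n : Int) s = pvDsLoop ((n / 10 : Nat) : Int) (s + ((n % 10 : Nat) : Int)) := by
  rw [pvDsLoop]
  rw [if_pos (by exact_mod_cast hn)]
  rw [show ((10 : Int)) = ((10 : Nat) : Int) by norm_num]
  rw [PySem.Int.floordiv_natCast, PySem.Int.mod_natCast]

lemma pvSumds_toDigitsCore :
    ∀ (fuel n : Nat) (ds : List Char), n < fuel →
      pvSumds (Nat.toDigitsCore 10 fuel n ds) = pvDsLoop (n : Int) (pvSumds ds) := by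
  intro fuel
  induction fuel with
  | zero => intro n ds h; omega
  | succ fuel ih =>
    intro n ds h
    show pvSumds (Nat.toDigitsCore 10 (fuel + 1) n ds) = _
    rw [Nat.toDigitsCore]
    by_cases h0 : n = 0
    · subst h0
      simp only [Nat.zero_mod, Nat.zero_div, if_true]
      rw [pvSumds_cons, pvIntOfChar_digitChar 0 (by omega)]
      rw [pvDsLoop, if_neg (by omega)]
      simp
    · by_cases hq : n / 10 = 0
      · simp only [hq, if_true]
        rw [pvSumds_cons, pvIntOfChar_digitChar (n % 10) (Nat.mod_lt _ (by omega))]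
        rw [pvDsLoop_natCast n _ (by omega), hq]
        rw [pvDsLoop, if_neg (by norm_num)]
        push_cast; ring
      · simp only [hq, if_false]
        rw [ih (n / 10) _ (by omega)]
        rw [pvSumds_cons, pvIntOfChar_digitChar (n % 10) (Nat.mod_lt _ (by omega))]
        rw [pvDsLoop_natCast n _ (by omega)]
        congr 1
        push_cast; ring

lemma pvSumds_toChars (t : Int) (ht : 0 ≤ t) :
    pvSumds (PySem.Int.toChars t) = pvDsLoop t 0 := by
  rw [show PySem.Int.toChars t = Nat.toDigits 10 t.toNat by
        simp [PySem.Int.toChars, not_lt.mpr ht]]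
  rw [Nat.toDigits, pvSumds_toDigitsCore (t.toNat + 1) t.toNat [] (by omega)]
  rw [Int.toNat_of_nonneg ht]
  rfl

lemma pvDsLoop_nonneg (t s : Int) (hs : 0 ≤ s) : 0 ≤ pvDsLoop t s := by
  fun_induction pvDsLoop t s with
  | case1 t s ht ih =>
    exact ih (by have := PySem.Int.mod_nonneg t (b := 10) (by omega); omega)
  | case2 t s ht => exact hs

lemma pvPerChar (n : Nat) (h1 : 97 ≤ n) (h2 : n ≤ 122) :
    pvSumds (PySem.Int.toChars ((n : Int) - 97 + 1)) =
      (if ((n : Int) - 97 + 1) < 10 then ((n : Int) - 97 + 1)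
       else PySem.Int.floordiv ((n : Int) - 97 + 1) 10 + PySem.Int.mod ((n : Int) - 97 + 1) 10) := by
  interval_cases n <;> decide

lemma pvCharBounds (c : Char) (h1 : 'a' ≤ c) (h2 : c ≤ 'z') :
    97 ≤ c.toNat ∧ c.toNat ≤ 122 := by
  simp [Char.le_def] at h1 h2
  exact ⟨h1, h2⟩

lemma pvBStep_nonneg (c : Char) (h1 : 'a' ≤ c) (h2 : c ≤ 'z') : 0 ≤ pvBStep c := by
  obtain ⟨hl, hr⟩ := pvCharBounds c h1 h2
  unfold pvBStep
  split_ifs with h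
  · omega
  · have h10 : (0 : Int) < 10 := by norm_num
    have := PySem.Int.mod_nonneg ((c.toNat : Int) - 97 + 1) h10
    have := PySem.Int.floordiv_eq_ediv_of_pos (a := (c.toNat : Int) - 97 + 1) h10
    omega

-- A's string build and B's arithmetic scan compute matching results
lemma pvScan_eq :
    ∀ (cs : List Char) (acc : List Char) (s : Int),
      (∀ c ∈ cs, 'a' ≤ c ∧ c ≤ 'z') → s = pvSumds acc →
      (pvBuild? acc cs).map pvSumds = pvScan? cs s := by
  intro cs
  induction cs with
  | nil => intro acc s _ hs; simp [pvBuild?, pvScan?, hs]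
  | cons c cs ih =>
    intro acc s hv hs
    have hc := hv c (by simp)
    obtain ⟨hl, hr⟩ := pvCharBounds c hc.1 hc.2
    rw [pvBuild?, pvScan?, if_pos hc, if_pos hc]
    apply ih _ _ (fun d hd => hv d (by simp [hd]))
    simp only [pvSumds, List.map_append, List.sum_append]
    rw [hs]
    have := pvPerChar c.toNat hl hr
    simp only [pvSumds] at this
    rw [this]
    rfl

lemma pvScan_nonneg :
    ∀ (cs : List Char) (s : Int), (∀ c ∈ cs, 'a' ≤ c ∧ c ≤ 'z') → 0 ≤ s →
      ∀ r, pvScan? cs s = some r → 0 ≤ r := by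
  intro cs
  induction cs with
  | nil => intro s _ hs r hr; simp [pvScan?] at hr; omega
  | cons c cs ih =>
    intro s hv hs r hr
    have hc := hv c (by simp)
    rw [pvScan?, if_pos hc] at hr
    exact ih _ (fun d hd => hv d (by simp [hd]))
      (by show 0 ≤ s + pvBStep c; have := pvBStep_nonneg c hc.1 hc.2; omega) r hr

-- the two k-1-round loops agree step by step on a nonnegative state
lemma pvFold_eq :
    ∀ (l1 l2 : List Int), l1.length = l2.length → ∀ t : Int, 0 ≤ t →
      l1.foldl (fun ds _ => pvSumds (PySem.Int.toChars ds)) t =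
      l2.foldl (fun x _ => pvDsLoop x 0) t := by
  intro l1
  induction l1 with
  | nil => intro l2 hlen t _; cases l2 with
    | nil => rfl
    | cons b l2 => simp at hlen
  | cons a l1 ih =>
    intro l2 hlen t ht
    cases l2 with
    | nil => simp at hlen
    | cons b l2 =>
      simp only [List.foldl_cons]
      rw [pvSumds_toChars t ht]
      exact ih l2 (by simpa using hlen) _ (pvDsLoop_nonneg t 0 le_rfl)

lemma pvRange_len (k : Int) :
    (PySem.List.pyRange 2 (k + 1) 1).length = (PySem.List.pyRange 0 (k - 1) 1).length := by
  simp only [PySem.List.pyRange]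
  norm_num
  split_ifs <;> omega

-- ===== VERDICT (by name: the statement is the Claim_ definition above) =====
theorem alphabet_index_digit_sum_spec : Claim_equal_alphabet_index_digit_sum := by
  intro text k _ hpre
  obtain ⟨hne, hk, hv'⟩ := hpre
  have hv : ∀ c ∈ text.toList, 'a' ≤ c ∧ c ≤ 'z' := by
    simpa [List.all_eq_true] using hv'
  unfold Spec_alphabet_index_digit_sum alphabet_index_digit_sum alphabet_index_digit_sum_alt
  rw [if_neg hne, if_neg hne, if_neg (by omega), if_neg (by omega)]
  have hscan := pvScan_eq text.toList [] 0 hv (by rfl)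
  cases hb : pvBuild? [] text.toList with
  | none =>
    rw [hb] at hscan
    simp only [Option.map_none] at hscan
    rw [← hscan]
  | some numbers =>
    rw [hb] at hscan
    simp only [Option.map_some] at hscan
    rw [← hscan]
    exact pvFold_eq _ _ (pvRange_len k) (pvSumds numbers)
      (pvScan_nonneg text.toList 0 hv le_rfl (pvSumds numbers) hscan.symm)
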